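-- pv_equiv track=rewrite | github.com/lcinrain/6subpattern | TGAs/6Forest/target_generation.py | compressed
-- ===== SOURCE A (Python) =====
-- def compressed(hextets):
--     best_doublecolon_start = -1
--     best_doublecolon_len = 0
--     doublecolon_start = -1
--     doublecolon_len = 0
--     for index, hextet in enumerate(hextets):
--         if hextet == '0':
--             doublecolon_len += 1
--             if doublecolon_start == -1:
--                 # Start of a sequence of zeros.
--                 doublecolon_start = index
--             if doublecolon_len > best_doublecolon_len:
--                 # This is the longest sequence of zeros so far.
--                 best_doublecolon_len = doublecolon_len
--                 best_doublecolon_start = doublecolon_start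
--         else:
--             doublecolon_len = 0
--             doublecolon_start = -1
--
--     if best_doublecolon_len > 1:
--         best_doublecolon_end = (best_doublecolon_start +
--                                 best_doublecolon_len)
--         # For zeros at the end of the address.
--         if best_doublecolon_end == len(hextets):
--             hextets += ['']
--         hextets[best_doublecolon_start:best_doublecolon_end] = ['']
--         # For zeros at the beginning of the address.
--         if best_doublecolon_start == 0:
--             hextets = [''] + hextets
--     return hextets
-- ===== SOURCE B (Python) =====
-- def compressed(hextets):
--     # One pass: collect maximal runs of '0' hextets as (start, length),
--     # then pick the earliest longest run and do A's exact in-place edit.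
--     runs = []
--     start = None
--     for i, h in enumerate(hextets):
--         if h == '0':
--             if start is None:
--                 start = i
--         elif start is not None:
--             runs.append((start, i - start))
--             start = None
--     if start is not None:
--         runs.append((start, len(hextets) - start))
--     if not runs:
--         return hextets
--     start, length = max(runs, key=lambda r: r[1])
--     if length > 1:
--         end = start + length
--         if end == len(hextets):
--             hextets += ['']
--         hextets[start:end] = ['']
--         if start == 0:
--             hextets = [''] + hextets
--     return hextets
-- ===== Notes on version B (the rewrite author's own statement) =====
-- stated objective: alternative
-- what changed: Replaces A's four-counter running-best loop by a single scan that collects the maximal zero-runs as (start,length) pairs and then picks the earliest longest run with max(key=length), keeping A's in-place slice edit identical.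
import Mathlib
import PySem

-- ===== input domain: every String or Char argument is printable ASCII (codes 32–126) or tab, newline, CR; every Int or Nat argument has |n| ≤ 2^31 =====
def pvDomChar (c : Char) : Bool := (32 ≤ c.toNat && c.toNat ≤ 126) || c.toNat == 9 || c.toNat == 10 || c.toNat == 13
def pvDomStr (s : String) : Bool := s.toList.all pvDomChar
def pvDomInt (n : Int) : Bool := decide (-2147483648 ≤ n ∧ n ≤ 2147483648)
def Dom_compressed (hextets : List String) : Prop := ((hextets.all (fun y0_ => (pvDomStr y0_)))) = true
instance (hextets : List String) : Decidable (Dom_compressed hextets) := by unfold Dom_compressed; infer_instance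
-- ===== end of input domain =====

-- B replaces A's four-counter best-so-far loop by a run-list scan + first-max pick (objective: alternative);
-- A mutates its argument in place, B performs the same mutation; the equivalence proved here is about the return value.

-- ===== PORT A =====
-- A's enumerate loop over (best_start, best_len, cur_start, cur_len)
def compressedLoopA : List String → Int → Int → Int → Int → Int → Int × Int
  | [], _, bs, bl, _, _ => (bs, bl)
  | h :: t, i, bs, bl, cs, cl =>
    if h = "0" then
      let cl' := cl + 1
      let cs' := if cs = -1 then i else cs
      if cl' > bl then compressedLoopA t (i + 1) cs' cl' cs' cl'
      else compressedLoopA t (i + 1) bs bl cs' cl'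
    else compressedLoopA t (i + 1) bs bl (-1) 0

def compressed (hextets : List String) : List String :=
  let r := compressedLoopA hextets 0 (-1) 0 (-1) 0
  if r.2 > 1 then
    let be := r.1 + r.2
    -- 'hextets += [""]' when the run reaches the end
    let hx := if be = (hextets.length : Int) then hextets ++ [""] else hextets
    -- slice assignment hx[r.1:be] = ['']; here 0 ≤ r.1 ≤ be ≤ len hx, so take/drop is exact
    let hx2 := hx.take r.1.toNat ++ [""] ++ hx.drop be.toNat
    if r.1 = 0 then "" :: hx2 else hx2
  else hextets

-- ===== PORT B =====
-- B's single scan collecting maximal zero runs as (start, length)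
def compressedRunsB : List String → Int → Option Int → List (Int × Int) → List (Int × Int)
  | [], i, pending, acc =>
    match pending with
    | some s => acc ++ [(s, i - s)]
    | none => acc
  | h :: t, i, pending, acc =>
    if h = "0" then
      match pending with
      | some s => compressedRunsB t (i + 1) (some s) acc
      | none => compressedRunsB t (i + 1) (some i) acc
    else
      match pending with
      | some s => compressedRunsB t (i + 1) none (acc ++ [(s, i - s)])
      | none => compressedRunsB t (i + 1) none acc

def compressed_alt (hextets : List String) : List String :=
  let runs := compressedRunsB hextets 0 none []
  -- 'if not runs: return hextets' + 'max(runs, key=lambda r: r[1])' (first maximum)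
  match PySem.List.max? runs (fun r => r.2) with
  | none => hextets
  | some (s, l) =>
    if l > 1 then
      let e := s + l
      let hx := if e = (hextets.length : Int) then hextets ++ [""] else hextets
      -- slice assignment hx[s:e] = ['']; here 0 ≤ s ≤ e ≤ len hx, so take/drop is exact
      let hx2 := hx.take s.toNat ++ [""] ++ hx.drop e.toNat
      if s = 0 then "" :: hx2 else hx2
    else hextets

-- ===== PRECONDITION & SPEC =====
def Spec_compressed (hextets : List String) (out : List String) : Prop := out = compressed_alt hextets
instance (hextets : List String) (out : List String) : Decidable (Spec_compressed hextets out) := by unfold Spec_compressed; infer_instance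

-- ===== CLAIM (what is proved, stated in full; the proofs are below) =====
def Claim_equal_compressed : Prop := ∀ (hextets : List String), Dom_compressed hextets → Spec_compressed hextets (compressed hextets)

-- ===== LEMMAS AND PROOFS =====

-- first-max-by-length fold, seeded with A's initial best (-1, 0)
def pvStep (b r : Int × Int) : Int × Int := if r.2 > b.2 then r else b
def pvFmax (runs : List (Int × Int)) : Int × Int := runs.foldl pvStep (-1, 0)

def pvOpen (pending : Option Int) (i : Int) : List (Int × Int) :=
  match pending with | some s => [(s, i - s)] | none => []

lemma fmax_snoc (acc : List (Int × Int)) (r : Int × Int) :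
    pvFmax (acc ++ [r]) = pvStep (pvFmax acc) r := by
  simp [pvFmax, List.foldl_append]

-- A's loop from a state describing the prefix's runs computes the first maximum of all runs
lemma loopA_runs : ∀ (l : List String) (i : Int) (pending : Option Int) (acc : List (Int × Int)),
    0 ≤ i → (∀ s, pending = some s → 0 ≤ s) →
    compressedLoopA l i (pvFmax (acc ++ pvOpen pending i)).1 (pvFmax (acc ++ pvOpen pending i)).2
      (match pending with | some s => s | none => -1)
      (match pending with | some s => i - s | none => 0)
      = pvFmax (compressedRunsB l i pending acc) := by
  intro l
  induction l with
  | nil =>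
    intro i pending acc _ _
    cases pending <;> simp [compressedLoopA, compressedRunsB, pvOpen]
  | cons h t ih =>
    intro i pending acc hi hp
    by_cases h0 : h = "0"
    · subst h0
      cases pending with
      | none =>
        have ih' := ih (i + 1) (some i) acc (by omega)
          (fun s' h' => by injection h' with e; omega)
        dsimp only at ih'
        have e1 : i + 1 - i = (1 : Int) := by ring
        rw [pvOpen] at ih'; rw [e1] at ih'; rw [fmax_snoc] at ih'
        simp only [pvOpen, List.append_nil]
        simp only [compressedLoopA, compressedRunsB, reduceIte, zero_add]
        by_cases hc : (1 : Int) > (pvFmax acc).2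
        · rw [if_pos hc]
          rw [show pvStep (pvFmax acc) (i, 1) = (i, 1) by rw [pvStep, if_pos hc]] at ih'
          exact ih'
        · rw [if_neg hc]
          rw [show pvStep (pvFmax acc) (i, 1) = pvFmax acc by rw [pvStep, if_neg hc]] at ih'
          exact ih'
      | some s =>
        have hs := hp s rfl
        have ih' := ih (i + 1) (some s) acc (by omega)
          (fun s' h' => by injection h' with e; omega)
        dsimp only at ih'
        have e1 : i + 1 - s = i - s + 1 := by ring
        rw [pvOpen] at ih'; rw [e1] at ih'; rw [fmax_snoc] at ih'
        set m := pvFmax acc with hm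
        rw [pvOpen, fmax_snoc]
        simp only [compressedLoopA, compressedRunsB, reduceIte]
        rw [if_neg (show ¬ s = -1 by omega)]
        by_cases h1 : i - s > m.2
        · rw [show pvStep m (s, i - s) = (s, i - s) by rw [pvStep, if_pos h1]]
          rw [show pvStep m (s, i - s + 1) = (s, i - s + 1) by
            rw [pvStep]; exact if_pos (by dsimp only; omega)] at ih'
          rw [if_pos (show i - s + 1 > (s, i - s).2 by dsimp only; omega)]
          exact ih'
        · rw [show pvStep m (s, i - s) = m by rw [pvStep, if_neg h1]]
          by_cases h2 : i - s + 1 > m.2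
          · rw [show pvStep m (s, i - s + 1) = (s, i - s + 1) by rw [pvStep, if_pos h2]] at ih'
            rw [if_pos h2]
            exact ih'
          · rw [show pvStep m (s, i - s + 1) = m by rw [pvStep, if_neg h2]] at ih'
            rw [if_neg h2]
            exact ih'
    · cases pending with
      | none =>
        have ih' := ih (i + 1) none acc (by omega) (by simp)
        dsimp only at ih'
        simp only [pvOpen, List.append_nil] at *
        simp only [compressedLoopA, compressedRunsB, if_neg h0]
        exact ih'
      | some s =>
        have ih' := ih (i + 1) none (acc ++ [(s, i - s)]) (by omega) (by simp)
        dsimp only at ih'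
        simp only [pvOpen, List.append_nil] at ih'
        rw [pvOpen, fmax_snoc, show pvStep (pvFmax acc) (s, i - s) =
          pvFmax (acc ++ [(s, i - s)]) from (fmax_snoc acc _).symm]
        simp only [compressedLoopA, compressedRunsB, if_neg h0]
        exact ih'

-- every run produced by B's scan has positive length
lemma runsB_pos : ∀ (l : List String) (i : Int) (pending : Option Int) (acc : List (Int × Int)),
    (∀ r ∈ acc, 0 < r.2) → (∀ s, pending = some s → s < i) →
    ∀ r ∈ compressedRunsB l i pending acc, 0 < r.2 := by
  intro l
  induction l with
  | nil =>
    intro i pending acc ha hp r hr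
    cases pending with
    | none => exact ha r hr
    | some s =>
      simp [compressedRunsB] at hr
      rcases hr with hr | hr
      · exact ha r hr
      · have := hp s rfl; simp [hr]; omega
  | cons h t ih =>
    intro i pending acc ha hp r hr
    by_cases h0 : h = "0"
    · cases pending with
      | none =>
        refine ih (i+1) (some i) acc ha ?_ r (by simpa [compressedRunsB, h0] using hr)
        rintro s hs; cases hs; omega
      | some s =>
        refine ih (i+1) (some s) acc ha ?_ r (by simpa [compressedRunsB, h0] using hr)
        rintro s' hs; cases hs; have := hp s rfl; omega
    · cases pending with
      | none =>
        exact ih (i+1) none acc ha (by simp) r (by simpa [compressedRunsB, h0] using hr)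
      | some s =>
        refine ih (i+1) none (acc ++ [(s, i - s)]) ?_ (by simp) r (by simpa [compressedRunsB, h0] using hr)
        intro q hq
        rcases List.mem_append.1 hq with hq | hq
        · exact ha q hq
        · have := hp s rfl; simp at hq; simp [hq]; omega

-- PySem.List.max? (Python's max(key=…), first maximum) on a nonempty list is the pvStep fold from its head
lemma max?_cons : ∀ (rs : List (Int × Int)) (r : Int × Int),
    PySem.List.max? (r :: rs) (fun q => q.2) = some (rs.foldl pvStep r) := by
  intro rs
  induction rs with
  | nil => intro r; rfl
  | cons q t ih =>
    intro r
    have h1 : PySem.List.max? (r :: q :: t) (fun y => y.2) =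
        PySem.List.max? (pvStep r q :: t) (fun y => y.2) := by
      simp only [PySem.List.max?, List.foldl, pvStep]
      by_cases h : r.2 < q.2
      · rw [if_pos h, if_pos h]
      · rw [if_neg h, if_neg h]
    rw [h1, ih (pvStep r q)]
    rfl

-- ===== VERDICT (by name: the statement is the Claim_ definition above) =====
theorem compressed_spec : Claim_equal_compressed := by
  intro hextets _
  unfold Spec_compressed compressed compressed_alt
  dsimp only
  have hmain := loopA_runs hextets 0 none [] le_rfl (by simp)
  simp only [pvOpen, List.append_nil] at hmain
  rw [show pvFmax ([] : List (Int × Int)) = ((-1 : Int), (0 : Int)) from rfl] at hmain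
  dsimp only at hmain
  cases hrs : compressedRunsB hextets 0 none [] with
  | nil =>
    rw [hrs] at hmain
    rw [hmain]
    norm_num [PySem.List.max?, pvFmax, List.foldl]
  | cons r rs =>
    rw [hrs] at hmain
    have hrpos : 0 < r.2 :=
      runsB_pos hextets 0 none [] (by simp) (by simp) r (hrs ▸ List.mem_cons_self ..)
    have hfm : pvFmax (r :: rs) = rs.foldl pvStep r := by
      have h0 : pvStep (-1, 0) r = r := by
        rw [pvStep]; exact if_pos (by dsimp only; omega)
      simp [pvFmax, List.foldl, h0]
    rw [hfm] at hmain
    rw [hmain, max?_cons rs r]
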